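-- pv_equiv track=rewrite | github.com/Amirrezat1379/Robotics_projects | Project-9831041-9831111/2/VFH/src/vfh.py | find_valley
-- ===== SOURCE A (Python) =====
-- def find_valley(hprime, thresh):
--     valley = []
--     thisValley = []
--     j = 0
--     for i in range(len(hprime)):
--         if hprime[i] < thresh:
--             if j == 0:
--                 thisValley.append(i)
--             j = 1
--         else:
--             if len(thisValley) > 0:
--                 thisValley.append(i - 1)
--                 valley.append(thisValley)
--                 thisValley = []
--     return valley
-- ===== SOURCE B (Python) =====
-- def find_valley(hprime, thresh):
--     n = len(hprime)
--     start = 0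
--     while start < n and hprime[start] >= thresh:
--         start += 1
--     if start == n:
--         return []
--     e = start + 1
--     while e < n and hprime[e] < thresh:
--         e += 1
--     if e == n:
--         return []
--     return [[start, e - 1]]
-- ===== Notes on version B (the rewrite author's own statement) =====
-- stated objective: simpler
-- what changed: Replaced A's single-pass loop over all indices with state flags (valley list, open-valley buffer, never-reset j flag) by two directed linear scans: find the first index below thresh, then the first later index at-or-above thresh, returning at most that one closed valley directly.
import Mathlib
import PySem

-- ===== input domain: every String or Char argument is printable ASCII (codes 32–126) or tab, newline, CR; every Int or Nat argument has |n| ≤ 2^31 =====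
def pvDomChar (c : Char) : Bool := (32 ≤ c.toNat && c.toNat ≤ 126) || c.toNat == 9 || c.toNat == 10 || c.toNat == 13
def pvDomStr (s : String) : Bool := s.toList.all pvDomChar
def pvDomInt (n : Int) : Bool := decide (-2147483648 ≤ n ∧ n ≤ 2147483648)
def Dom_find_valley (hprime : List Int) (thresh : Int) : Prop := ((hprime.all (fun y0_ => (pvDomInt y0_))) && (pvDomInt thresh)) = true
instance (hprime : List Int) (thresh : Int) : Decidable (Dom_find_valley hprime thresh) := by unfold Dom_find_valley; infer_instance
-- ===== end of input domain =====

-- B replaces A's single stateful flag-loop by two directed linear scans (find the first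
-- below-threshold index, then the first index closing that valley); same result, same O(n) cost.

-- ===== PORT A =====
-- state = (valley, thisValley, j); hprime[i] with i drawn from range(len(hprime)) is always
-- in range, so List.getD is exact here.
def fvStepA (hprime : List Int) (thresh : Int)
    (st : List (List Int) × List Int × Int) (i : Nat) : List (List Int) × List Int × Int :=
  if hprime.getD i 0 < thresh then
    (st.1, (if st.2.2 == 0 then st.2.1 ++ [(i : Int)] else st.2.1), 1)
  else
    if 0 < st.2.1.length then
      (st.1 ++ [st.2.1 ++ [(i : Int) - 1]], [], st.2.2)
    else st

def find_valley (hprime : List Int) (thresh : Int) : List (List Int) :=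
  ((List.range hprime.length).foldl (fvStepA hprime thresh) ([], [], 0)).1

-- ===== PORT B =====
-- while start < n and hprime[start] >= thresh: start += 1
def fvScanGe (hprime : List Int) (thresh : Int) (i : Nat) : Nat :=
  if i < hprime.length then
    if thresh ≤ hprime.getD i 0 then fvScanGe hprime thresh (i + 1) else i
  else i
termination_by hprime.length - i

-- while e < n and hprime[e] < thresh: e += 1
def fvScanLt (hprime : List Int) (thresh : Int) (i : Nat) : Nat :=
  if i < hprime.length then
    if hprime.getD i 0 < thresh then fvScanLt hprime thresh (i + 1) else i
  else i
termination_by hprime.length - i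

def find_valley_alt (hprime : List Int) (thresh : Int) : List (List Int) :=
  let n := hprime.length
  let start := fvScanGe hprime thresh 0
  if start == n then []
  else
    let e := fvScanLt hprime thresh (start + 1)
    if e == n then [] else [[(start : Int), (e : Int) - 1]]

-- ===== PRECONDITION & SPEC =====
def Spec_find_valley (hprime : List Int) (thresh : Int) (out : List (List Int)) : Prop := out = find_valley_alt hprime thresh
instance (hprime : List Int) (thresh : Int) (out : List (List Int)) : Decidable (Spec_find_valley hprime thresh out) := by unfold Spec_find_valley; infer_instance

-- ===== CLAIM (what is proved, stated in full; the proofs are below) =====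
def Claim_equal_find_valley : Prop := ∀ (hprime : List Int) (thresh : Int), Dom_find_valley hprime thresh → Spec_find_valley hprime thresh (find_valley hprime thresh)

-- ===== LEMMAS AND PROOFS =====

-- once a valley was closed the state (v, [], 1) is absorbing (j is never reset in A)
theorem fvFoldA_absorb (hprime : List Int) (thresh : Int) :
    ∀ (l i : Nat) (v : List (List Int)),
      (List.range' i l).foldl (fvStepA hprime thresh) (v, [], 1) = (v, [], 1) := by
  intro l
  induction l with
  | zero => intro i v; simp
  | succ l ih =>
      intro i v
      simp only [List.range'_succ, List.foldl_cons]
      have hstep : fvStepA hprime thresh (v, [], 1) i = (v, [], 1) := by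
        simp [fvStepA]
      rw [hstep, ih]

-- with a valley open at s (state ([], [s], 1)) the loop closes it at the first index ≥ thresh
theorem fvFoldA_open (hprime : List Int) (thresh : Int) :
    ∀ (l i : Nat), i + l = hprime.length → ∀ (s : Int),
      ((List.range' i l).foldl (fvStepA hprime thresh) ([], [s], 1)).1 =
        (if fvScanLt hprime thresh i == hprime.length then []
         else [[s, (fvScanLt hprime thresh i : Int) - 1]]) := by
  intro l
  induction l with
  | zero =>
      intro i hi s
      have : ¬ i < hprime.length := by omega
      rw [fvScanLt]
      simp [this]
      omega
  | succ l ih =>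
      intro i hi s
      have hlt : i < hprime.length := by omega
      simp only [List.range'_succ, List.foldl_cons]
      by_cases hv : hprime.getD i 0 < thresh
      · have hstep : fvStepA hprime thresh ([], [s], 1) i = ([], [s], 1) := by
          unfold fvStepA; rw [if_pos hv]; simp
        have hsc : fvScanLt hprime thresh i = fvScanLt hprime thresh (i + 1) := by
          rw [fvScanLt, if_pos hlt, if_pos hv]
        rw [hstep, ih (i + 1) (by omega) s, hsc]
      · have hstep : fvStepA hprime thresh ([], [s], 1) i = ([[s, (i : Int) - 1]], [], 1) := by
          unfold fvStepA; rw [if_neg hv]; simp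
        have hsc : fvScanLt hprime thresh i = i := by
          rw [fvScanLt, if_pos hlt, if_neg hv]
        have hne : ¬ (i = hprime.length) := by omega
        rw [hstep, fvFoldA_absorb, hsc]
        simp [hne]

-- from the initial state, A's loop computes exactly B's two-scan answer
theorem fvFoldA_init (hprime : List Int) (thresh : Int) :
    ∀ (l i : Nat), i + l = hprime.length →
      ((List.range' i l).foldl (fvStepA hprime thresh) ([], [], 0)).1 =
        (if fvScanGe hprime thresh i == hprime.length then []
         else if fvScanLt hprime thresh (fvScanGe hprime thresh i + 1) == hprime.length then []
         else [[(fvScanGe hprime thresh i : Int),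
                (fvScanLt hprime thresh (fvScanGe hprime thresh i + 1) : Int) - 1]]) := by
  intro l
  induction l with
  | zero =>
      intro i hi
      have : ¬ i < hprime.length := by omega
      rw [fvScanGe]
      simp [this]
      omega
  | succ l ih =>
      intro i hi
      have hlt : i < hprime.length := by omega
      simp only [List.range'_succ, List.foldl_cons]
      by_cases hv : hprime.getD i 0 < thresh
      · have hstep : fvStepA hprime thresh ([], [], 0) i = ([], [(i : Int)], 1) := by
          unfold fvStepA; rw [if_pos hv]; simp
        rw [hstep, fvFoldA_open hprime thresh l (i + 1) (by omega) (i : Int)]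
        have hge : fvScanGe hprime thresh i = i := by
          rw [fvScanGe, if_pos hlt, if_neg (not_le.mpr hv)]
        have hne : ¬ (i = hprime.length) := by omega
        rw [hge]
        simp [hne]
      · have hstep : fvStepA hprime thresh ([], [], 0) i = ([], [], 0) := by
          unfold fvStepA; rw [if_neg hv]; simp
        rw [hstep, ih (i + 1) (by omega)]
        have hge : fvScanGe hprime thresh i = fvScanGe hprime thresh (i + 1) := by
          rw [fvScanGe, if_pos hlt, if_pos (not_lt.mp hv)]
        rw [hge]

-- ===== VERDICT (by name: the statement is the Claim_ definition above) =====
theorem find_valley_spec : Claim_equal_find_valley := by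
  intro hprime thresh _
  unfold Spec_find_valley find_valley find_valley_alt
  rw [show List.range hprime.length = List.range' 0 hprime.length from List.range_eq_range']
  rw [fvFoldA_init hprime thresh hprime.length 0 (by omega)]
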